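-- pv_equiv track=rewrite | github.com/tofolo17/MAC0110-files | MAC Multimídia/05.py | permuta
-- ===== SOURCE A (Python) =====
-- def permuta(V):
--   s_0, s_1 = 0, 0
--   for el in V:
--     if el == 0:
--       s_0 += 1
--     if el == 1:
--       s_1 += 1
--
--   return s_0 == len(V) - 1 and s_1 == 1
-- ===== SOURCE B (Python) =====
-- def permuta(V):
--   return sorted(V) == [0] * (len(V) - 1) + [1]
-- ===== Notes on version B (the rewrite author's own statement) =====
-- stated objective: simpler
-- what changed: Replaced the single-pass double-counter loop by a sort-and-compare permutation check: the sorted input is compared with the canonical target of len(V)-1 zeros followed by a single one.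
import Mathlib
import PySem

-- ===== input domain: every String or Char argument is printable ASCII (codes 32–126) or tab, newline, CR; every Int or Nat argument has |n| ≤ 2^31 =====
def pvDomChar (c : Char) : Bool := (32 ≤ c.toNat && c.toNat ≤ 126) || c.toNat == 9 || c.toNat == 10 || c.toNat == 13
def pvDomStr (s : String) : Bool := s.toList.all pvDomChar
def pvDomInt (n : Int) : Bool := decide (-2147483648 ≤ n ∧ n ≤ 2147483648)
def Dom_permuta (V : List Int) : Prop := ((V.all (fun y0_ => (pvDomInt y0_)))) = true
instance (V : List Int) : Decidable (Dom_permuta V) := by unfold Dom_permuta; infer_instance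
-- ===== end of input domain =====

-- B replaces A's double-counter loop by a sort-and-compare permutation check (objective: simpler).

-- ===== PORT A =====
def permuta (V : List Int) : Bool :=
  let p := V.foldl (fun (s : Int × Int) el =>
    (if el == 0 then s.1 + 1 else s.1,
     if el == 1 then s.2 + 1 else s.2)) (0, 0)
  (p.1 == (V.length : Int) - 1) && (p.2 == 1)

-- ===== PORT B =====
def permuta_alt (V : List Int) : Bool :=
  PySem.List.sorted V (fun x => x) false == List.replicate (V.length - 1) 0 ++ [1]

-- ===== PRECONDITION & SPEC =====
def Spec_permuta (V : List Int) (out : Bool) : Prop := out = permuta_alt V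
instance (V : List Int) (out : Bool) : Decidable (Spec_permuta V out) := by unfold Spec_permuta; infer_instance

-- ===== CLAIM (what is proved, stated in full; the proofs are below) =====
def Claim_equal_permuta : Prop := ∀ (V : List Int), Dom_permuta V → Spec_permuta V (permuta V)

-- ===== LEMMAS AND PROOFS =====

/-- A's fold computes the two counts. -/
theorem permuta_fold_counts (V : List Int) (s0 s1 : Int) :
    V.foldl (fun (s : Int × Int) el =>
      (if el == 0 then s.1 + 1 else s.1,
       if el == 1 then s.2 + 1 else s.2)) (s0, s1)
    = (s0 + (V.count 0 : Int), s1 + (V.count 1 : Int)) := by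
  induction V generalizing s0 s1 with
  | nil => simp
  | cons a t ih =>
    simp only [List.foldl_cons, List.count_cons, ih]
    by_cases h0 : a = 0 <;> by_cases h1 : a = 1 <;>
      simp [h0, h1] <;> ring

/-- at most one 0 and one 1 per element -/
theorem count01_le_length (V : List Int) : V.count 0 + V.count 1 ≤ V.length := by
  induction V with
  | nil => simp
  | cons a t ih =>
    simp only [List.count_cons, List.length_cons]
    by_cases h0 : a = 0 <;> by_cases h1 : a = 1 <;> simp [h0, h1] <;> omega

/-- if the two counts fill the length, every element is 0 or 1 -/
theorem mem_01_of_counts (V : List Int)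
    (h : V.count 0 + V.count 1 = V.length) : ∀ x ∈ V, x = 0 ∨ x = 1 := by
  induction V with
  | nil => simp
  | cons a t ih =>
    intro x hx
    simp only [List.count_cons, List.length_cons] at h
    by_cases h0 : a = 0
    · rcases List.mem_cons.1 hx with rfl | hx'
      · exact Or.inl h0
      · exact ih (by simp [h0] at h; omega) x hx'
    · by_cases h1 : a = 1
      · rcases List.mem_cons.1 hx with rfl | hx'
        · exact Or.inr h1
        · exact ih (by simp [h1] at h; omega) x hx'
      · exfalso
        have := count01_le_length t
        simp [h0, h1] at h
        omega

/-- count of any value in the canonical target -/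
theorem count_target (k : Nat) (a : Int) :
    (List.replicate k (0 : Int) ++ [1]).count a
      = (if a = 0 then k else 0) + (if a = 1 then 1 else 0) := by
  by_cases h0 : a = 0 <;> by_cases h1 : a = 1 <;>
    simp [List.count_append, List.count_replicate, List.count_singleton, h0, h1]; omega

/-- counts-characterisation of being a permutation of the target -/
theorem perm_target_iff (V : List Int) :
    V.Perm (List.replicate (V.length - 1) (0 : Int) ++ [1])
      ↔ V.count 0 = V.length - 1 ∧ V.count 1 = 1 ∧ 1 ≤ V.length := by
  constructor
  · intro hp
    have hlen := hp.length_eq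
    simp [List.length_replicate] at hlen
    have h0 := hp.count_eq 0
    have h1 := hp.count_eq 1
    rw [count_target] at h0 h1
    simp at h0 h1
    exact ⟨h0, h1, by omega⟩
  · rintro ⟨h0, h1, hn⟩
    rw [List.perm_iff_count]
    intro a
    rw [count_target]
    by_cases ha0 : a = 0
    · simp [ha0, h0]
    · by_cases ha1 : a = 1
      · simp [ha1, h1]
      · simp [ha0, ha1]
        rw [List.count_eq_zero]
        intro hmem
        rcases mem_01_of_counts V (by omega) a hmem with rfl | rfl
        · exact ha0 rfl
        · exact ha1 rfl

/-- the canonical target is nondecreasing -/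
theorem target_pairwise (k : Nat) :
    (List.replicate k (0 : Int) ++ [1]).Pairwise (· ≤ ·) := by
  rw [List.pairwise_append]
  refine ⟨List.pairwise_replicate.2 (by simp), by simp, ?_⟩
  intro x hx y hy
  simp at hx hy
  omega

/-- A in terms of the two counts -/
theorem permuta_eq (V : List Int) :
    permuta V = (((V.count 0 : Int) == (V.length : Int) - 1) && ((V.count 1 : Int) == 1)) := by
  unfold permuta
  rw [permuta_fold_counts]
  simp

/-- B returns true exactly on permutations of the target -/
theorem alt_true_iff (V : List Int) :
    permuta_alt V = true ↔ V.Perm (List.replicate (V.length - 1) (0 : Int) ++ [1]) := by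
  unfold permuta_alt
  rw [beq_iff_eq]
  constructor
  · intro h
    have := PySem.List.sorted_perm V (fun x => x) false
    rw [h] at this
    exact this.symm
  · intro hp
    exact PySem.List.sorted_id_eq_of_perm_of_pairwise V _ hp.symm (target_pairwise _)

-- ===== VERDICT (by name: the statement is the Claim_ definition above) =====
theorem permuta_spec : Claim_equal_permuta := by
  intro V _
  unfold Spec_permuta
  rw [Bool.eq_iff_iff]
  simp only [permuta_eq, Bool.and_eq_true, beq_iff_eq]
  rw [alt_true_iff, perm_target_iff]
  have h0 := List.count_le_length (l := V) (a := (0 : Int))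
  have h1 := List.count_le_length (l := V) (a := (1 : Int))
  constructor
  · rintro ⟨ha, hb⟩
    refine ⟨by omega, by omega, by omega⟩
  · rintro ⟨ha, hb, hn⟩
    constructor <;> [skip; omega]
    have : (V.count 0 : Int) = (V.length : Int) - 1 := by omega
    simpa using this
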